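-- pv_equiv track=rewrite | github.com/ReidMason/cat-updates | main.py | check_for_rehomed_cats
-- ===== SOURCE A (Python) =====
-- def check_for_rehomed_cats(new_cat_data, old_cat_data):
--     rehomed_cats = []
--
--     for cat in new_cat_data:
--         id = cat.get('nid')
--         cat_rehomed = cat.get('field_animal_rehomed')
--         for old_cat in old_cat_data:
--             old_cat_rehomed = old_cat.get('field_animal_rehomed')
--             if old_cat.get('nid') == id and cat_rehomed != '' and old_cat_rehomed == '':
--                 rehomed_cats.append(cat)
--
--     return rehomed_cats
-- ===== SOURCE B (Python) =====
-- def check_for_rehomed_cats(new_cat_data, old_cat_data):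
--     # one pass over old cats: nid -> number of old entries with empty rehomed field
--     pending = {}
--     for old_cat in old_cat_data:
--         if old_cat.get('field_animal_rehomed') == '':
--             nid = old_cat.get('nid')
--             pending[nid] = pending.get(nid, 0) + 1
--     # one pass over new cats
--     rehomed_cats = []
--     for cat in new_cat_data:
--         if cat.get('field_animal_rehomed') != '':
--             rehomed_cats.extend([cat] * pending.get(cat.get('nid'), 0))
--     return rehomed_cats
-- ===== Notes on version B (the rewrite author's own statement) =====
-- stated objective: faster
-- what changed: Replaces the nested loop over old cats for each new cat with a single pass that builds a dict nid -> count of old entries with empty rehomed field, then one pass over new cats emitting each cat that many times.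
import Mathlib
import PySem

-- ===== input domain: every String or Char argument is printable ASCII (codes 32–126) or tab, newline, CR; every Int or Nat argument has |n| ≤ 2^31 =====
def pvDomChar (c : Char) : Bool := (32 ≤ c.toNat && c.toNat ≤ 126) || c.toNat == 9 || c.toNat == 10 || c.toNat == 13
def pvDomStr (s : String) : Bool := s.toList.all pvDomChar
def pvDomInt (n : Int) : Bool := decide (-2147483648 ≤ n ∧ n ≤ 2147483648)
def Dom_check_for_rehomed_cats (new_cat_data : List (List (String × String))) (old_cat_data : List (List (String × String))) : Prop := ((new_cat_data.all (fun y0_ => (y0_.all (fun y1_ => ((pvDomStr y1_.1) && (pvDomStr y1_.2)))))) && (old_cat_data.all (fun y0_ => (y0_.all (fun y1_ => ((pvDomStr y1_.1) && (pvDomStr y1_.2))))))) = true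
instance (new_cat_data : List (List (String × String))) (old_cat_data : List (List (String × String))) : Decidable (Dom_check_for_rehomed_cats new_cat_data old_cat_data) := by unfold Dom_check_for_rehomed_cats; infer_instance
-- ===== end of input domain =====

-- B replaces A's nested scan with a one-pass nid->count index over old cats and one pass over new cats (faster).
-- ===== PORT A =====
def check_for_rehomed_cats (new_cat_data : List (List (String × String))) (old_cat_data : List (List (String × String))) : List (List (String × String)) :=
  new_cat_data.foldl (fun rehomed_cats cat =>
    let id := (PySem.Dict.mk cat).get? "nid"
    let cat_rehomed := (PySem.Dict.mk cat).get? "field_animal_rehomed"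
    old_cat_data.foldl (fun acc old_cat =>
      let old_cat_rehomed := (PySem.Dict.mk old_cat).get? "field_animal_rehomed"
      if ((PySem.Dict.mk old_cat).get? "nid" == id) && !(cat_rehomed == some "") && (old_cat_rehomed == some "") then
        acc ++ [cat]
      else acc) rehomed_cats) []

-- ===== PORT B =====
def check_for_rehomed_cats_alt (new_cat_data : List (List (String × String))) (old_cat_data : List (List (String × String))) : List (List (String × String)) :=
  let pending : PySem.Dict (Option String) Nat :=
    old_cat_data.foldl (fun d old_cat =>
      if (PySem.Dict.mk old_cat).get? "field_animal_rehomed" == some "" then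
        let nid := (PySem.Dict.mk old_cat).get? "nid"
        d.insert nid (d.getD nid 0 + 1)
      else d) PySem.Dict.empty
  new_cat_data.foldl (fun rehomed_cats cat =>
    if !((PySem.Dict.mk cat).get? "field_animal_rehomed" == some "") then
      rehomed_cats ++ List.replicate (pending.getD ((PySem.Dict.mk cat).get? "nid") 0) cat
    else rehomed_cats) []

-- ===== PRECONDITION & SPEC =====
def Spec_check_for_rehomed_cats (new_cat_data : List (List (String × String))) (old_cat_data : List (List (String × String))) (out : List (List (String × String))) : Prop := out = check_for_rehomed_cats_alt new_cat_data old_cat_data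
instance (new_cat_data : List (List (String × String))) (old_cat_data : List (List (String × String))) (out : List (List (String × String))) : Decidable (Spec_check_for_rehomed_cats new_cat_data old_cat_data out) := by unfold Spec_check_for_rehomed_cats; infer_instance

-- ===== CLAIM (what is proved, stated in full; the proofs are below) =====
def Claim_equal_check_for_rehomed_cats : Prop := ∀ (new_cat_data : List (List (String × String))) (old_cat_data : List (List (String × String))), Dom_check_for_rehomed_cats new_cat_data old_cat_data → Spec_check_for_rehomed_cats new_cat_data old_cat_data (check_for_rehomed_cats new_cat_data old_cat_data)

-- ===== LEMMAS AND PROOFS =====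

-- B's counting loop computes, for every key k, the number of old cats with empty rehomed field and nid k.
theorem pending_getD (old : List (List (String × String))) (d : PySem.Dict (Option String) Nat) (k : Option String) :
    (old.foldl (fun d old_cat =>
      if (PySem.Dict.mk old_cat).get? "field_animal_rehomed" == some "" then
        d.insert ((PySem.Dict.mk old_cat).get? "nid") (d.getD ((PySem.Dict.mk old_cat).get? "nid") 0 + 1)
      else d) d).getD k 0
    = d.getD k 0 + old.countP (fun oc => ((PySem.Dict.mk oc).get? "nid" == k) && ((PySem.Dict.mk oc).get? "field_animal_rehomed" == some "")) := by
  induction old generalizing d with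
  | nil => simp
  | cons oc rest ih =>
    simp only [List.foldl_cons, List.countP_cons]
    by_cases h : ((PySem.Dict.mk oc).get? "field_animal_rehomed" == some "") = true
    · rw [if_pos h, ih]
      by_cases hk : ((PySem.Dict.mk oc).get? "nid") = k
      · subst hk
        simp [PySem.Dict.getD_insert_self, h]
        omega
      · have : ((PySem.Dict.mk oc).get? "nid" == k) = false := by
          simp [hk]
        rw [PySem.Dict.getD_insert, if_neg (fun hkk => hk hkk.symm)]
        simp [this]
    · rw [if_neg h, ih]
      have : ((PySem.Dict.mk oc).get? "field_animal_rehomed" == some "") = false := by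
        simpa using h
      simp [this]

-- A's inner loop appends `cat` once per old cat satisfying the guard.
theorem inner_loop (old : List (List (String × String))) (p : List (String × String) → Bool)
    (acc : List (List (String × String))) (cat : List (String × String)) :
    old.foldl (fun a oc => if p oc then a ++ [cat] else a) acc
    = acc ++ List.replicate (old.countP p) cat := by
  induction old generalizing acc with
  | nil => simp
  | cons oc rest ih =>
    simp only [List.foldl_cons, List.countP_cons]
    by_cases h : p oc = true
    · rw [if_pos h, ih, h]
      simp only [if_true]
      rw [List.append_assoc]
      simp [List.replicate_succ]
    · rw [if_neg h, ih]
      simp [h]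

-- ===== VERDICT (by name: the statement is the Claim_ definition above) =====
theorem check_for_rehomed_cats_spec : Claim_equal_check_for_rehomed_cats := by
  intro new_cat_data old_cat_data _
  unfold Spec_check_for_rehomed_cats check_for_rehomed_cats check_for_rehomed_cats_alt
  apply List.foldl_ext
  intro acc cat _
  simp only
  rw [inner_loop]
  by_cases hcr : ((PySem.Dict.mk cat).get? "field_animal_rehomed" == some "") = true
  · have hz : (old_cat_data.countP fun oc =>
        ((PySem.Dict.mk oc).get? "nid" == (PySem.Dict.mk cat).get? "nid") &&
        !((PySem.Dict.mk cat).get? "field_animal_rehomed" == some "") &&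
        ((PySem.Dict.mk oc).get? "field_animal_rehomed" == some "")) = 0 := by
      rw [List.countP_eq_zero]
      intro oc _
      simp [hcr]
    simp [hcr]
  · have hb : (!((PySem.Dict.mk cat).get? "field_animal_rehomed" == some "")) = true := by
      simpa using hcr
    rw [if_pos hb, pending_getD]
    simp only [PySem.Dict.getD_empty, Nat.zero_add]
    congr 1
    congr 1
    apply List.countP_congr
    intro oc _
    simp [hb]
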